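-- pv_equiv track=rewrite | github.com/bitextor/biroamer | biner.py | include_nonaligned
-- ===== SOURCE A (Python) =====
-- def include_nonaligned(word_alignment, meta_part):
--     """Heuristic to add to the alignment intermediate words that are likely
--     to be taken into account in the result"""
--
--     if len(word_alignment) == 0:
--         return word_alignment
--
--     additions = []
--     my_range = range(min(word_alignment), max(word_alignment)+1)
--     for i in my_range:
--         if i not in meta_part:
--             additions.append(i)
--
--     result = set(additions + list(word_alignment))
--
--     if len(result) > len(my_range) / 2:
--         return result
--     else:
--         return word_alignment
-- ===== SOURCE B (Python) =====
-- def include_nonaligned(word_alignment, meta_part):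
--     """Heuristic to add to the alignment intermediate words that are likely
--     to be taken into account in the result"""
--
--     if len(word_alignment) == 0:
--         return word_alignment
--
--     lo, hi = min(word_alignment), max(word_alignment)
--     rlen = hi + 1 - lo
--     keep = set(word_alignment)
--     # Distinct meta positions inside the range that the alignment does not
--     # cover: exactly the values missing from the candidate result, so
--     # len(result) == rlen - len(blocked) — the size test needs no range scan.
--     blocked = {m for m in meta_part if lo <= m <= hi and m not in keep}
--     if 2 * (rlen - len(blocked)) > rlen:
--         return set(range(lo, hi + 1)).difference(meta_part).union(word_alignment)
--     return word_alignment
-- ===== Notes on version B (the rewrite author's own statement) =====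
-- stated objective: alternative
-- what changed: B decides the len(result) > len(range)/2 test by counting the distinct in-range meta positions outside the alignment (one pass over meta_part, no range scan, no result built), using len(result) = len(range) - len(blocked); only when the test succeeds does it materialise the set, via set(range).difference(meta_part).union(word_alignment) instead of A's membership-test loop with an accumulator.
import Mathlib
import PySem

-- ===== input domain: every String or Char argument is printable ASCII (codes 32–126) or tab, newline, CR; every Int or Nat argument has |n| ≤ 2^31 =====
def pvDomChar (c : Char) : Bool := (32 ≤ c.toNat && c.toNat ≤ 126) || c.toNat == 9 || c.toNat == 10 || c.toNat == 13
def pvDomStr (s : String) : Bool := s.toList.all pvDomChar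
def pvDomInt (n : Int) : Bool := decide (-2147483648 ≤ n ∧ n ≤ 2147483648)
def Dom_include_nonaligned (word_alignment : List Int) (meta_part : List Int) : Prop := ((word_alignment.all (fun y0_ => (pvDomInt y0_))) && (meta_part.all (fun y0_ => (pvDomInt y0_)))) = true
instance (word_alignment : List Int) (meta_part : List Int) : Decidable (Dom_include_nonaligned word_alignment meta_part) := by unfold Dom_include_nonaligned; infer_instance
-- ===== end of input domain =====

-- B decides the size test by counting the distinct in-range meta positions not covered
-- by the alignment (one pass over meta_part, no range scan, no result set built), and
-- materialises the result set only when it is actually returned; objective: alternative.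
-- Outputs are Python sets, compared as sets.

-- ===== PORT A =====
def include_nonaligned (word_alignment : List Int) (meta_part : List Int) : List Int :=
  if word_alignment.length = 0 then word_alignment
  else
    match PySem.List.min? word_alignment (fun x => x), PySem.List.max? word_alignment (fun x => x) with
    | some mn, some mx =>
        let my_range := PySem.List.pyRange mn (mx + 1) 1
        let additions := my_range.foldl
          (fun acc i => if meta_part.contains i then acc else acc ++ [i]) []
        let result := PySem.Set.ofList (additions ++ word_alignment)
        -- len(result) > len(my_range)/2  ⟺  2*len(result) > len(my_range) on ints
        if my_range.length < result.length * 2 then result else word_alignment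
    | _, _ => word_alignment   -- unreachable: word_alignment ≠ []

-- ===== PORT B =====
def include_nonaligned_alt (word_alignment : List Int) (meta_part : List Int) : List Int :=
  if word_alignment.length = 0 then word_alignment
  else
    match PySem.List.min? word_alignment (fun x => x) with
    | none => word_alignment   -- unreachable: word_alignment ≠ []
    | some lo =>
      match PySem.List.max? word_alignment (fun x => x) with
      | none => word_alignment   -- unreachable: word_alignment ≠ []
      | some hi =>
        let rlen : Int := hi + 1 - lo
        let keep := PySem.Set.ofList word_alignment
        let blocked := PySem.Set.ofList (meta_part.filter
          (fun m => decide (lo ≤ m) && decide (m ≤ hi) && !(PySem.Set.contains keep m)))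
        if rlen < 2 * (rlen - (blocked.length : Int)) then
          PySem.Set.union
            (PySem.Set.diff (PySem.Set.ofList (PySem.List.pyRange lo (hi + 1) 1)) meta_part)
            word_alignment
        else word_alignment

-- ===== PRECONDITION & SPEC =====
def Spec_include_nonaligned (word_alignment : List Int) (meta_part : List Int) (out : List Int) : Prop := out = include_nonaligned_alt word_alignment meta_part
instance (word_alignment : List Int) (meta_part : List Int) (out : List Int) : Decidable (Spec_include_nonaligned word_alignment meta_part out) := by unfold Spec_include_nonaligned; infer_instance

-- ===== CLAIM (what is proved, stated in full; the proofs are below) =====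
def Claim_equal_include_nonaligned : Prop := ∀ (word_alignment : List Int) (meta_part : List Int), Dom_include_nonaligned word_alignment meta_part → Spec_include_nonaligned word_alignment meta_part (include_nonaligned word_alignment meta_part)

-- ===== LEMMAS AND PROOFS =====

-- A's append-if loop builds exactly the filtered range.
theorem pv_additions_eq_filter (mp rng : List Int) :
    rng.foldl (fun acc i => if mp.contains i then acc else acc ++ [i]) [] =
      rng.filter (fun i => !mp.contains i) := by
  have h : (fun (acc : List Int) i => if mp.contains i then acc else acc ++ [i]) =
      (fun acc x => if (!mp.contains x) then acc ++ [x] else acc) := by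
    funext acc x; cases hx : mp.contains x <;> simp_all
  rw [h, PySem.List.foldl_append_if (fun x => !mp.contains x) (fun x => x) rng []]
  simp

-- B's set(rng).difference(mp) is the same filtered range.
theorem pv_diff_eq_filter (mp : List Int) {rng : List Int} (hnd : rng.Nodup) :
    PySem.Set.diff (PySem.Set.ofList rng) mp = rng.filter (fun i => !mp.contains i) := by
  rw [PySem.Set.ofList_eq_self_of_nodup rng hnd]
  rfl

-- A's set(additions + list(wa)) is B's .union(wa) on the deduplicated additions.
theorem pv_ofList_append_eq_union (wa : List Int) {f : List Int} (hf : f.Nodup) :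
    PySem.Set.ofList (f ++ wa) = PySem.Set.union f wa := by
  rw [PySem.Set.ofList_eq_foldl, List.foldl_append, ← PySem.Set.ofList_eq_foldl,
    PySem.Set.ofList_eq_self_of_nodup _ hf]
  rfl

-- The cardinality identity behind B's size test: |(rng \ mp) ∪ wa| + |blocked| = |rng|
-- whenever every element of wa lies in [lo, hi].
theorem pv_card (lo hi : Int) (wa mp : List Int)
    (hwa : ∀ w ∈ wa, lo ≤ w ∧ w ≤ hi) :
    (PySem.Set.union
        ((PySem.List.pyRange lo (hi + 1) 1).filter (fun i => !mp.contains i)) wa).length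
      + (PySem.Set.ofList (mp.filter
          (fun m => decide (lo ≤ m) && decide (m ≤ hi)
            && !(PySem.Set.contains (PySem.Set.ofList wa) m)))).length
      = (PySem.List.pyRange lo (hi + 1) 1).length := by
  set rng := PySem.List.pyRange lo (hi + 1) 1 with hrng
  have hndr : rng.Nodup := PySem.List.nodup_pyRange_one _ _
  have hndf : (rng.filter (fun i => !mp.contains i)).Nodup := hndr.filter _
  have hres : (PySem.Set.union (rng.filter (fun i => !mp.contains i)) wa).Nodup :=
    PySem.Set.nodup_union _ wa hndf
  have hblk : (PySem.Set.ofList (mp.filter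
      (fun m => decide (lo ≤ m) && decide (m ≤ hi)
        && !(PySem.Set.contains (PySem.Set.ofList wa) m)))).Nodup :=
    PySem.Set.nodup_ofList _
  rw [← List.toFinset_card_of_nodup hres, ← List.toFinset_card_of_nodup hblk,
    ← List.toFinset_card_of_nodup hndr]
  have hU : (PySem.Set.union (rng.filter (fun i => !mp.contains i)) wa).toFinset ∪
      (PySem.Set.ofList (mp.filter
        (fun m => decide (lo ≤ m) && decide (m ≤ hi)
          && !(PySem.Set.contains (PySem.Set.ofList wa) m)))).toFinset = rng.toFinset := by
    ext i
    have hwi := fun (hx : i ∈ wa) => hwa i hx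
    simp only [Finset.mem_union, List.mem_toFinset, PySem.Set.mem_union, PySem.Set.mem_ofList,
      List.mem_filter, hrng, PySem.List.mem_pyRange_one, Int.lt_add_one_iff,
      Bool.and_eq_true, decide_eq_true_eq, PySem.Set.contains_eq_listContains,
      List.contains_eq_mem, Bool.not_eq_true', Bool.not_eq_eq_eq_not, Bool.not_true,
      decide_eq_false_iff_not]
    tauto
  have hD : Disjoint
      (PySem.Set.union (rng.filter (fun i => !mp.contains i)) wa).toFinset
      (PySem.Set.ofList (mp.filter
        (fun m => decide (lo ≤ m) && decide (m ≤ hi)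
          && !(PySem.Set.contains (PySem.Set.ofList wa) m)))).toFinset := by
    rw [Finset.disjoint_left]
    intro i h1 h2
    simp only [List.mem_toFinset, PySem.Set.mem_union, PySem.Set.mem_ofList, List.mem_filter,
      Bool.and_eq_true, decide_eq_true_eq, PySem.Set.contains_eq_listContains,
      List.contains_eq_mem, Bool.not_eq_true', Bool.not_eq_eq_eq_not, Bool.not_true,
      decide_eq_false_iff_not] at h1 h2
    tauto
  rw [← hU, Finset.card_union_of_disjoint hD]

-- ===== VERDICT (by name: the statement is the Claim_ definition above) =====
theorem include_nonaligned_spec : Claim_equal_include_nonaligned := by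
  intro wa mp _
  unfold Spec_include_nonaligned include_nonaligned include_nonaligned_alt
  by_cases h : wa.length = 0
  · simp [h]
  · simp only [h, if_false]
    cases hmn : PySem.List.min? wa (fun x => x) <;>
      cases hmx : PySem.List.max? wa (fun x => x) <;> try rfl
    rename_i lo hi
    have hwa : ∀ w ∈ wa, lo ≤ w ∧ w ≤ hi :=
      fun w hw => ⟨PySem.List.min?_isMin hmn w hw, PySem.List.max?_isMax hmx w hw⟩
    have hlohi : lo ≤ hi := (hwa lo (PySem.List.min?_mem hmn)).2
    simp only [pv_additions_eq_filter,
      pv_diff_eq_filter mp (PySem.List.nodup_pyRange_one _ _),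
      pv_ofList_append_eq_union wa
        ((PySem.List.nodup_pyRange_one lo (hi + 1)).filter _)]
    have hcard := pv_card lo hi wa mp hwa
    have hlen : (PySem.List.pyRange lo (hi + 1) 1).length = (hi + 1 - lo).toNat :=
      PySem.List.length_pyRange_one _ _
    have hcond :
        ((PySem.List.pyRange lo (hi + 1) 1).length <
          (PySem.Set.union
            ((PySem.List.pyRange lo (hi + 1) 1).filter (fun i => !mp.contains i)) wa).length * 2)
        ↔ ((hi + 1 - lo : Int) < 2 * ((hi + 1 - lo) -
            ((PySem.Set.ofList (mp.filter
              (fun m => decide (lo ≤ m) && decide (m ≤ hi)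
                && !(PySem.Set.contains (PySem.Set.ofList wa) m)))).length : Int))) := by
      rw [hlen] at hcard ⊢
      omega
    by_cases hc : (PySem.List.pyRange lo (hi + 1) 1).length <
        (PySem.Set.union
          ((PySem.List.pyRange lo (hi + 1) 1).filter (fun i => !mp.contains i)) wa).length * 2
    · rw [if_pos hc, if_pos (hcond.mp hc)]
    · rw [if_neg hc, if_neg (fun hb => hc (hcond.mpr hb))]
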